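-- pv_equiv track=rewrite | github.com/AllanKoder/Competitive-Programming-Training | practice/mcpc/digits_2.py | count_supersets
-- ===== SOURCE A (Python) =====
-- MOD = 10**9 + 7
--
-- def count_supersets(a, m):
--     bits_m = m.bit_length()
--     dp = {True: 1, False: 0}
--     for i in reversed(range(bits_m)):
--         bit_m = (m >> i) & 1
--         bit_a = (a >> i) & 1
--         newdp = {True: 0, False: 0}
--         for tight, ways in dp.items():
--             if bit_a == 1:
--                 if bit_m == 0 and tight:
--                     continue
--                 new_tight = tight and (bit_m == 1)
--                 newdp[new_tight] = (newdp[new_tight] + ways) % MOD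
--             else:
--                 limit = bit_m if tight else 1
--                 for b in range(limit+1):
--                     new_tight = tight and (b == bit_m)
--                     newdp[new_tight] = (newdp[new_tight] + ways) % MOD
--         dp = newdp
--     return (dp[True] + dp[False]) % MOD
-- ===== SOURCE B (Python) =====
-- MOD = 10**9 + 7
--
-- def count_supersets(a, m):
--     # Break-point sweep: walk m's bits from the top while the prefix can stay
--     # tight; each position where m has a 1 and a has a 0 contributes
--     # 2**(number of free zero bits of a below it) supersets that drop below m.
--     res = 0
--     tight = True
--     for i in range(m.bit_length() - 1, -1, -1):
--         bit_m = (m >> i) & 1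
--         bit_a = (a >> i) & 1
--         if bit_m == 1 and bit_a == 0:
--             zeros_below = i - (a & ((1 << i) - 1)).bit_count()
--             res += pow(2, zeros_below, MOD)
--         elif bit_m == 0 and bit_a == 1:
--             tight = False
--             break
--     if tight:
--         res += 1
--     return res % MOD
-- ===== Notes on version B (the rewrite author's own statement) =====
-- stated objective: alternative
-- what changed: Replaces the two-state (tight/free) digit DP over a bool-keyed dict with a single top-down break-point sweep that, at each bit where m has 1 and a has 0 while the prefix is still tight, directly adds pow(2, free-zero-bits-below, MOD), breaking as soon as tightness is lost.
import Mathlib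
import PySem

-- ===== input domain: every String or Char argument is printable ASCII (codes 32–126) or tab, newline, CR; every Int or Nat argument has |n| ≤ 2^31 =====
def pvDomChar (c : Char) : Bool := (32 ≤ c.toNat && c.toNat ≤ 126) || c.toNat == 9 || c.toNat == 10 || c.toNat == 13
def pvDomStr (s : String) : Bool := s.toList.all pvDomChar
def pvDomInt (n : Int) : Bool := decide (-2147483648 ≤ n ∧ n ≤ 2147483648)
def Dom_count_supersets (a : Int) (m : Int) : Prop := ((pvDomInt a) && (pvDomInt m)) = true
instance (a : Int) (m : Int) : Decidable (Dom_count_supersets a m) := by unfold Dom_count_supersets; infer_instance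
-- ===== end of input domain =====

-- B replaces A's two-state digit DP over a bool-keyed dict by a single top-down break-point
-- sweep adding 2^(free zero bits of a below each break position) (objective: alternative).


def pvMOD : Int := 1000000007

-- ===== PORT A =====
-- one iteration of A's outer loop: the inner 'for tight, ways in dp.items()' over the
-- bool-keyed dict, with `continue`, the tight/free `limit` range loop, and mod at each add
def csStep (a m : Int) (dp : PySem.Dict Bool Int) (i : Nat) : PySem.Dict Bool Int :=
  let bit_m := PySem.Int.band (m >>> i) 1
  let bit_a := PySem.Int.band (a >>> i) 1
  dp.items.foldl (fun newdp tw =>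
      if bit_a = 1 then
        if bit_m = 0 ∧ tw.1 = true then newdp
        else
          let new_tight := tw.1 && (bit_m == 1)
          newdp.insert new_tight (PySem.Int.mod (newdp.getD new_tight 0 + tw.2) pvMOD)
      else
        let limit := if tw.1 = true then bit_m else 1
        (PySem.List.pyRange 0 (limit + 1) 1).foldl (fun newdp b =>
            let new_tight := tw.1 && (b == bit_m)
            newdp.insert new_tight (PySem.Int.mod (newdp.getD new_tight 0 + tw.2) pvMOD)) newdp)
    (PySem.Dict.ofList [(true, 0), (false, 0)])

-- 'for i in reversed(range(bits_m))' is the fold over (List.range bits_m).reverse.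
-- dp[True] / dp[False]: both keys are always present (written at every step), so getD's
-- default is never consulted and matches Python's d[k] on every reachable state.
def count_supersets (a : Int) (m : Int) : Int :=
  let bits_m := PySem.Int.bitLength m
  let dp := ((List.range bits_m).reverse).foldl (csStep a m)
    (PySem.Dict.ofList [(true, 1), (false, 0)])
  PySem.Int.mod (dp.getD true 0 + dp.getD false 0) pvMOD

-- ===== PORT B =====
-- Source B's 'for i in range(bits-1, -1, -1)' with break, as recursion on i+1; the Bool is `tight`.
-- The exponent 'i - (a & ((1 << i) - 1)).bit_count()' is never negative in Python
-- (a & ((1 << i) - 1) is a nonnegative i-bit value), so Nat subtraction is exact here.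
def csAltLoop (a m : Int) : Nat → Int → Int × Bool
  | 0, res => (res, true)
  | i + 1, res =>
    let bit_m := PySem.Int.band (m >>> i) 1
    let bit_a := PySem.Int.band (a >>> i) 1
    if bit_m = 1 ∧ bit_a = 0 then
      csAltLoop a m i
        (res + PySem.Int.powMod 2 (i - PySem.Int.bitCount (PySem.Int.band a ((1 <<< i) - 1))) pvMOD)
    else if bit_m = 0 ∧ bit_a = 1 then (res, false)
    else csAltLoop a m i res

def count_supersets_alt (a : Int) (m : Int) : Int :=
  let p := csAltLoop a m (PySem.Int.bitLength m) 0
  PySem.Int.mod (p.1 + (if p.2 then 1 else 0)) pvMOD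

-- ===== PRECONDITION & SPEC =====
def Spec_count_supersets (a : Int) (m : Int) (out : Int) : Prop := out = count_supersets_alt a m
instance (a : Int) (m : Int) (out : Int) : Decidable (Spec_count_supersets a m out) := by unfold Spec_count_supersets; infer_instance

-- ===== CLAIM (what is proved, stated in full; the proofs are below) =====
def Claim_equal_count_supersets : Prop := ∀ (a : Int) (m : Int), Dom_count_supersets a m → Spec_count_supersets a m (count_supersets a m)

-- ===== LEMMAS AND PROOFS =====

-- bit i of x, Python style: (x >> i) & 1 ∈ {0, 1} (two's complement on negatives)
def bitOf (x : Int) (j : Nat) : Int := PySem.Int.band (x >>> j) 1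

-- number of one bits among the low k bits of a (B's '(a & ((1 << i) - 1)).bit_count()')
def onesLow (a : Int) (k : Nat) : Nat :=
  PySem.Int.bitCount (PySem.Int.band a (((1 <<< k : Nat) : Int) - 1))

-- "the prefix [k, hi) can still be tight": every 1 bit of a there is also a 1 bit of m
def aliveB (a m : Int) (k hi : Nat) : Bool :=
  decide (∀ j, j < hi → k ≤ j → bitOf a j = 1 → bitOf m j = 1)

-- j is a break position: prefix above j still tight, m has a 1 and a has a 0 at j
def brkB (a m : Int) (hi j : Nat) : Bool :=
  aliveB a m (j + 1) hi && (bitOf m j == 1) && (bitOf a j == 0)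

-- A-side sum: breaks in [k, hi) weighted by 2^(zero bits of a in [k, j)); A's dp[False]
-- is congruent to it mod pvMOD throughout the loop
def SA (a m : Int) (hi k : Nat) : Int :=
  if k < hi then
    (if brkB a m hi k then 1 else 0) + (if bitOf a k = 0 then 2 else 1) * SA a m hi (k + 1)
  else 0
  termination_by hi - k

-- B-side sum of the k lowest terms, each term already reduced mod pvMOD
def SB (a m : Int) (hi : Nat) : Nat → Int
  | 0 => 0
  | k + 1 =>
    SB a m hi k + (if brkB a m hi k then PySem.Int.mod (2 ^ (k - onesLow a k)) pvMOD else 0)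

-- B-side tail sum over [k, hi)
def TB (a m : Int) (hi k : Nat) : Int :=
  if k < hi then
    (if brkB a m hi k then PySem.Int.mod (2 ^ (k - onesLow a k)) pvMOD else 0) + TB a m hi (k + 1)
  else 0
  termination_by hi - k

lemma pvMOD_eq : pvMOD = 1000000007 := rfl

lemma mod01 (t : Int) (h : t = 0 ∨ t = 1) : PySem.Int.mod t pvMOD = t := by
  rcases h with h | h <;> rw [h] <;> decide

lemma modM (x : Int) : PySem.Int.mod x pvMOD = x % pvMOD :=
  PySem.Int.mod_eq_emod_of_pos (h := by norm_num [pvMOD])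

lemma bitOf_zero_or_one (x : Int) (j : Nat) : bitOf x j = 0 ∨ bitOf x j = 1 := by
  have h := PySem.Int.band_one (x >>> j)
  have h0 := PySem.Int.mod_nonneg (x >>> j) (b := 2) (by norm_num)
  have h1 := PySem.Int.mod_lt (x >>> j) (b := 2) (by norm_num)
  unfold bitOf; omega

lemma emod_unique (a b r q : Int) (h : a = b * q + r) (h0 : 0 ≤ r) (h1 : r < b) : a % b = r := by
  subst h; rw [add_comm, Int.add_mul_emod_self_left]; exact Int.emod_eq_of_lt h0 h1

-- Python's low-bit mask is floored mod: a & ((1 << k) - 1) = a % 2**k, for every a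
lemma band_mask (a : Int) (k : Nat) :
    PySem.Int.band a (((1 <<< k : Nat) : Int) - 1) = PySem.Int.mod a (2 ^ k) := by
  have hP : (0:Int) < 2 ^ k := by positivity
  have hPn : (0:Nat) < 2 ^ k := by positivity
  have hsh : (((1 <<< k : Nat) : Int)) = 2 ^ k := by
    rw [Nat.shiftLeft_eq]; push_cast; ring
  have hcast : ((2:Int) ^ k - 1).toNat = 2 ^ k - 1 := by
    have : ((2:Int) ^ k) = ((2 ^ k : Nat) : Int) := by push_cast; ring
    omega
  rw [hsh, PySem.Int.mod_eq_emod_of_pos (h := hP)]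
  unfold PySem.Int.band
  rcases le_or_gt 0 a with ha | ha
  · rw [if_pos ha, if_pos (by omega)]
    rw [hcast, Nat.and_two_pow_sub_one_eq_mod]
    have h2 : a = (a.toNat : Int) := by omega
    conv_rhs => rw [h2]
    have : ((2:Int) ^ k) = ((2 ^ k : Nat) : Int) := by push_cast; ring
    rw [this]; exact_mod_cast rfl
  · rw [if_neg (by omega), if_pos (by omega)]
    set n := (-a - 1).toNat with hn
    rw [hcast, Nat.and_comm, Nat.and_two_pow_sub_one_eq_mod]
    have hmod := Nat.mod_lt n hPn
    have hml : n % 2 ^ k ≤ n := Nat.mod_le _ _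
    have hdiv := Nat.div_add_mod n (2 ^ k)
    have ha' : a = -1 - (n : Int) := by omega
    have hres : a % 2 ^ k = 2 ^ k - 1 - ((n % 2 ^ k : Nat) : Int) := by
      apply emod_unique _ _ _ (-((n / 2 ^ k : Nat) : Int) - 1)
      · have h2 : ((2:Int) ^ k) = ((2 ^ k : Nat) : Int) := by push_cast; ring
        rw [ha', h2]
        push_cast
        nlinarith [hdiv]
      · omega
      · omega
    rw [hres]; omega

lemma shr_eq (a : Int) (j : Nat) : a >>> j = a / 2 ^ j := by
  have := Int.shiftRight_eq_div_pow a j; simpa using this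

lemma bitOf_eq (a : Int) (j : Nat) : bitOf a j = (a / 2 ^ j) % 2 := by
  rw [bitOf, PySem.Int.band_one, shr_eq, PySem.Int.mod_eq_emod_of_pos (h := by norm_num)]

lemma bitOf_zero (a : Int) : bitOf a 0 = a % 2 := by simp [bitOf_eq]

lemma bitOf_succ (a : Int) (j : Nat) : bitOf a (j + 1) = bitOf (a / 2) j := by
  rw [bitOf_eq, bitOf_eq, pow_succ, mul_comm, ← Int.ediv_ediv_of_nonneg (by norm_num : (0:Int) ≤ 2)]

lemma mod_split (a : Int) (k : Nat) :
    a % 2 ^ (k + 1) = a % 2 + 2 * (a / 2 % 2 ^ k) := by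
  have h1 := Int.mul_ediv_add_emod a 2
  have h2 := Int.mul_ediv_add_emod (a / 2) (2 ^ k)
  have hb1 := Int.emod_nonneg a (by norm_num : (2:Int) ≠ 0)
  have hb2 := Int.emod_lt_of_pos a (by norm_num : (0:Int) < 2)
  have hb3 := Int.emod_nonneg (a / 2) (by positivity : ((2:Int) ^ k) ≠ 0)
  have hb4 := Int.emod_lt_of_pos (a / 2) (by positivity : (0:Int) < 2 ^ k)
  apply emod_unique _ _ _ (a / 2 / 2 ^ k)
  · rw [pow_succ]; nlinarith
  · omega
  · rw [pow_succ]; omega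

-- bitCount of the low k bits counts the 1 bits among them
lemma bitCount_mod_pow (k : Nat) : ∀ a : Int,
    PySem.Int.bitCount (a % 2 ^ k) = (List.range k).countP (fun j => bitOf a j == 1) := by
  induction k with
  | zero => intro a; simp [PySem.Int.bitCount_zero]
  | succ k ih =>
    intro a
    have hsplit := mod_split a k
    have hb1 := Int.emod_nonneg a (by norm_num : (2:Int) ≠ 0)
    have hb2 := Int.emod_lt_of_pos a (by norm_num : (0:Int) < 2)
    have hb3 := Int.emod_nonneg (a / 2) (by positivity : ((2:Int) ^ k) ≠ 0)
    set v := a % 2 ^ (k + 1) with hv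
    set r := a % 2 with hr
    set w := a / 2 % 2 ^ k with hw
    have hpeel : PySem.Int.bitCount v = r.toNat + PySem.Int.bitCount w := by
      rcases eq_or_lt_of_le (by omega : (0:Int) ≤ v) with h0 | h0
      · have : r = 0 ∧ w = 0 := by constructor <;> omega
        rw [← h0, this.1, this.2]
        simp [PySem.Int.bitCount_zero]
      · rw [PySem.Int.bitCount_of_pos (h := h0)]
        have e1 : PySem.Int.mod v 2 = r := by
          rw [PySem.Int.mod_eq_emod_of_pos (h := by norm_num)]
          apply emod_unique _ _ _ w; omega; omega; omega
        have e2 : PySem.Int.floordiv v 2 = w := by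
          rw [PySem.Int.floordiv_eq_ediv_of_pos (h := by norm_num)]
          omega
        rw [e1, e2]
    rw [hpeel, List.range_succ_eq_map, List.countP_cons, List.countP_map]
    have hb : bitOf a 0 = r := bitOf_zero a
    have hfun : ((fun j => bitOf a j == 1) ∘ Nat.succ) = (fun j => bitOf (a / 2) j == 1) := by
      funext j; simp only [Function.comp, Nat.succ_eq_add_one]; rw [bitOf_succ]
    rw [hfun, ← ih (a / 2), ← hw]
    have hdec : (bitOf a 0 == 1) = decide (r = 1) := by rw [hb]; rfl
    rw [hdec]
    rcases (by omega : r = 0 ∨ r = 1) with h | h <;> simp [h] <;> omega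

lemma onesLow_eq (a : Int) (k : Nat) :
    onesLow a k = (List.range k).countP (fun j => bitOf a j == 1) := by
  rw [onesLow, band_mask, PySem.Int.mod_eq_emod_of_pos (h := by positivity), bitCount_mod_pow]

lemma onesLow_le (a : Int) (k : Nat) : onesLow a k ≤ k := by
  rw [onesLow_eq]
  simpa using List.countP_le_length (p := fun j => bitOf a j == 1) (l := List.range k)

lemma onesLow_succ (a : Int) (k : Nat) :
    onesLow a (k + 1) = onesLow a k + (bitOf a k).toNat := by
  rw [onesLow_eq, onesLow_eq, List.range_succ, List.countP_append]
  rcases bitOf_zero_or_one a k with h | h <;> simp [h]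

lemma pow_zeros_succ (a : Int) (k : Nat) :
    (2:Int) ^ (k + 1 - onesLow a (k + 1)) = (if bitOf a k = 0 then 2 else 1) * 2 ^ (k - onesLow a k) := by
  have hle := onesLow_le a k
  have hs := onesLow_succ a k
  rcases bitOf_zero_or_one a k with h | h
  · rw [if_pos h]
    have : k + 1 - onesLow a (k + 1) = (k - onesLow a k) + 1 := by
      rw [hs, h]; simp only [Int.toNat_zero]; omega
    rw [this, pow_succ]; ring
  · rw [if_neg (by omega)]
    have : k + 1 - onesLow a (k + 1) = k - onesLow a k := by
      rw [hs, h]; simp only [Int.toNat_one]; omega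
    rw [this]; ring

lemma aliveB_true_iff (a m : Int) (k hi : Nat) :
    aliveB a m k hi = true ↔ ∀ j, j < hi → k ≤ j → bitOf a j = 1 → bitOf m j = 1 := by
  simp [aliveB]

lemma aliveB_false_iff (a m : Int) (k hi : Nat) :
    aliveB a m k hi = false ↔ ∃ j, j < hi ∧ k ≤ j ∧ bitOf a j = 1 ∧ ¬ bitOf m j = 1 := by
  rw [← Bool.not_eq_true, aliveB_true_iff]
  push Not
  constructor
  · rintro ⟨j, h1, h2, h3, h4⟩; exact ⟨j, h1, h2, h3, h4⟩
  · rintro ⟨j, h1, h2, h3, h4⟩; exact ⟨j, h1, h2, h3, h4⟩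

lemma aliveB_refl (a m : Int) (hi : Nat) : aliveB a m hi hi = true := by
  rw [aliveB_true_iff]; intro j h1 h2; omega

lemma aliveB_step (a m : Int) (k hi : Nat) (h : bitOf a k = 0 ∨ bitOf m k = 1) :
    aliveB a m k hi = aliveB a m (k + 1) hi := by
  cases h2 : aliveB a m (k + 1) hi
  · rw [aliveB_false_iff] at h2 ⊢
    obtain ⟨j, h1, hj, h3, h4⟩ := h2; exact ⟨j, h1, by omega, h3, h4⟩
  · rw [aliveB_true_iff] at h2 ⊢
    intro j hj hkj hbit
    rcases Nat.eq_or_lt_of_le hkj with rfl | hlt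
    · rcases h with h | h
      · omega
      · exact h
    · exact h2 j hj (by omega) hbit

lemma aliveB_dead (a m : Int) (k j hi : Nat) (hk : k < hi) (hjk : j ≤ k)
    (h1 : bitOf a k = 1) (h0 : bitOf m k = 0) : aliveB a m j hi = false := by
  rw [aliveB_false_iff]; exact ⟨k, hk, hjk, h1, by omega⟩

-- the four concrete shapes of one csStep on the reachable dicts {True: t, False: f}
lemma step11 (a m t f : Int) (k : Nat) (ha : bitOf a k = 1) (hm : bitOf m k = 1) :
    csStep a m (PySem.Dict.mk [(true, t), (false, f)]) k =
      PySem.Dict.mk [(true, PySem.Int.mod t pvMOD), (false, PySem.Int.mod f pvMOD)] := by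
  unfold csStep
  rw [show PySem.Int.band (m >>> k) 1 = 1 from hm, show PySem.Int.band (a >>> k) 1 = 1 from ha]
  simp [PySem.Dict.insert, PySem.Dict.getD, PySem.Dict.get?, PySem.Dict.ofList,
    PySem.Dict.empty, PySem.Dict.update, PySem.Dict.contains, List.find?]

lemma step10 (a m t f : Int) (k : Nat) (ha : bitOf a k = 1) (hm : bitOf m k = 0) :
    csStep a m (PySem.Dict.mk [(true, t), (false, f)]) k =
      PySem.Dict.mk [(true, 0), (false, PySem.Int.mod f pvMOD)] := by
  unfold csStep
  rw [show PySem.Int.band (m >>> k) 1 = 0 from hm, show PySem.Int.band (a >>> k) 1 = 1 from ha]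
  simp [PySem.Dict.insert, PySem.Dict.getD, PySem.Dict.get?, PySem.Dict.ofList,
    PySem.Dict.empty, PySem.Dict.update, PySem.Dict.contains, List.find?]

lemma step01 (a m t f : Int) (k : Nat) (ha : bitOf a k = 0) (hm : bitOf m k = 1) :
    csStep a m (PySem.Dict.mk [(true, t), (false, f)]) k =
      PySem.Dict.mk [(true, PySem.Int.mod t pvMOD),
        (false, PySem.Int.mod (PySem.Int.mod (PySem.Int.mod t pvMOD + f) pvMOD + f) pvMOD)] := by
  unfold csStep
  rw [show PySem.Int.band (m >>> k) 1 = 1 from hm, show PySem.Int.band (a >>> k) 1 = 0 from ha]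
  simp [PySem.Dict.insert, PySem.Dict.getD, PySem.Dict.get?, PySem.Dict.ofList,
    PySem.Dict.empty, PySem.Dict.update, PySem.Dict.contains, List.find?,
    PySem.List.pyRange, List.range_succ]

lemma step00 (a m t f : Int) (k : Nat) (ha : bitOf a k = 0) (hm : bitOf m k = 0) :
    csStep a m (PySem.Dict.mk [(true, t), (false, f)]) k =
      PySem.Dict.mk [(true, PySem.Int.mod t pvMOD),
        (false, PySem.Int.mod (PySem.Int.mod f pvMOD + f) pvMOD)] := by
  unfold csStep
  rw [show PySem.Int.band (m >>> k) 1 = 0 from hm, show PySem.Int.band (a >>> k) 1 = 0 from ha]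
  simp [PySem.Dict.insert, PySem.Dict.getD, PySem.Dict.get?,
    PySem.Dict.ofList, PySem.Dict.empty, PySem.Dict.update, PySem.Dict.contains, List.find?,
    PySem.List.pyRange, List.range_succ]

-- A's loop invariant: dp = {True: alive-indicator, False: f ≡ SA (mod pvMOD)}
lemma loopA (a m : Int) (hi : Nat) : ∀ k, k ≤ hi → ∀ t f : Int,
    t = (if aliveB a m k hi then 1 else 0) → 0 ≤ f → f < pvMOD →
    f % pvMOD = SA a m hi k % pvMOD →
    ∃ f', ((List.range k).reverse.foldl (csStep a m) (PySem.Dict.mk [(true, t), (false, f)]))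
        = PySem.Dict.mk [(true, if aliveB a m 0 hi then 1 else 0), (false, f')]
      ∧ 0 ≤ f' ∧ f' < pvMOD ∧ f' % pvMOD = SA a m hi 0 % pvMOD := by
  intro k
  induction k with
  | zero =>
    intro _ t f ht hf0 hf1 hfm
    exact ⟨f, by rw [ht]; rfl, hf0, hf1, hfm⟩
  | succ k ih =>
    intro hk t f ht hf0 hf1 hfm
    have hkhi : k < hi := by omega
    have ht01 : t = 0 ∨ t = 1 := by
      cases h : aliveB a m (k + 1) hi <;> rw [h] at ht <;> simp at ht <;> omega
    have hSA : SA a m hi k =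
        (if brkB a m hi k then 1 else 0) + (if bitOf a k = 0 then 2 else 1) * SA a m hi (k + 1) := by
      rw [SA, if_pos hkhi]
    rw [List.range_succ, List.reverse_append, List.reverse_singleton, List.singleton_append,
      List.foldl_cons]
    rcases bitOf_zero_or_one a k with ha | ha <;> rcases bitOf_zero_or_one m k with hm | hm
    · -- a0 m0: tight survives, dp[False] doubles
      rw [step00 a m t f k ha hm]
      have hbrk : brkB a m hi k = false := by simp [brkB, hm]
      apply ih (by omega)
      · rw [mod01 t ht01, aliveB_step a m k hi (Or.inl ha), ← ht]
      · rw [modM]; apply Int.emod_nonneg; norm_num [pvMOD_eq]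
      · rw [modM]; apply Int.emod_lt_of_pos; norm_num [pvMOD_eq]
      · have hz : (if brkB a m hi k then (1:Int) else 0) = 0 := by rw [hbrk]; simp
        rw [hSA, hz, if_pos ha]
        simp only [modM] at hfm ⊢
        simp only [pvMOD_eq] at hfm ⊢
        omega
    · -- a0 m1: break-point: dp[False] gains t and doubles
      rw [step01 a m t f k ha hm]
      have hbrk : brkB a m hi k = (aliveB a m (k + 1) hi) := by simp [brkB, hm, ha]
      apply ih (by omega)
      · rw [mod01 t ht01, aliveB_step a m k hi (Or.inl ha), ← ht]
      · rw [modM]; apply Int.emod_nonneg; norm_num [pvMOD_eq]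
      · rw [modM]; apply Int.emod_lt_of_pos; norm_num [pvMOD_eq]
      · have htb : (if brkB a m hi k then (1:Int) else 0) = t := by
          rw [hbrk, ht]
        rw [hSA, htb, if_pos ha]
        simp only [modM] at hfm ⊢
        simp only [pvMOD_eq] at hfm ⊢
        omega
    · -- a1 m0: tight dies, dp[False] kept
      rw [step10 a m t f k ha hm]
      have hbrk : brkB a m hi k = false := by simp [brkB, hm]
      apply ih (by omega)
      · rw [aliveB_dead a m k k hi hkhi (le_refl _) ha hm]; simp
      · rw [modM]; apply Int.emod_nonneg; norm_num [pvMOD_eq]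
      · rw [modM]; apply Int.emod_lt_of_pos; norm_num [pvMOD_eq]
      · have hz : (if brkB a m hi k then (1:Int) else 0) = 0 := by rw [hbrk]; simp
        rw [hSA, hz, if_neg (by omega)]
        simp only [modM] at hfm ⊢
        simp only [pvMOD_eq] at hfm ⊢
        omega
    · -- a1 m1: both kept unchanged
      rw [step11 a m t f k ha hm]
      have hbrk : brkB a m hi k = false := by simp [brkB, ha]
      apply ih (by omega)
      · rw [mod01 t ht01, aliveB_step a m k hi (Or.inr hm), ← ht]
      · rw [modM]; apply Int.emod_nonneg; norm_num [pvMOD_eq]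
      · rw [modM]; apply Int.emod_lt_of_pos; norm_num [pvMOD_eq]
      · have hz : (if brkB a m hi k then (1:Int) else 0) = 0 := by rw [hbrk]; simp
        rw [hSA, hz, if_neg (by omega)]
        simp only [modM] at hfm ⊢
        simp only [pvMOD_eq] at hfm ⊢
        omega

lemma SB_zero (a m : Int) (hi k : Nat) (hk : k < hi) (h1 : bitOf a k = 1) (h0 : bitOf m k = 0) :
    ∀ j, j ≤ k + 1 → SB a m hi j = 0 := by
  intro j hj
  induction j with
  | zero => rfl
  | succ j ih =>
    rw [SB, ih (by omega)]
    have hb : brkB a m hi j = false := by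
      rcases Nat.eq_or_lt_of_le (by omega : j + 1 ≤ k + 1) with h | h
      · have : j = k := by omega
        subst this
        simp [brkB, h0]
      · unfold brkB
        rw [aliveB_dead a m k (j + 1) hi hk (by omega) h1 h0]
        simp
    rw [hb]; simp

-- B's loop: while the processed prefix stays tight it accumulates exactly SB
lemma loopB (a m : Int) (hi : Nat) : ∀ k, k ≤ hi → ∀ res : Int, aliveB a m k hi = true →
    csAltLoop a m k res = (res + SB a m hi k, aliveB a m 0 hi) := by
  intro k
  induction k with
  | zero => intro _ res h; rw [csAltLoop, SB, add_zero, h]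
  | succ k ih =>
    intro hk res halive
    rw [csAltLoop]
    show (if bitOf m k = 1 ∧ bitOf a k = 0 then _ else if bitOf m k = 0 ∧ bitOf a k = 1 then _ else _) = _
    rcases bitOf_zero_or_one a k with ha | ha <;> rcases bitOf_zero_or_one m k with hm | hm
    · -- a0 m0
      rw [if_neg (by omega), if_neg (by omega)]
      have halive' : aliveB a m k hi = true := by rw [aliveB_step a m k hi (Or.inl ha)]; exact halive
      rw [ih (by omega) res halive']
      have hbrk : brkB a m hi k = false := by simp [brkB, hm]
      rw [SB, hbrk]; simp
    · -- a0 m1 : break-point add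
      rw [if_pos ⟨hm, ha⟩]
      have halive' : aliveB a m k hi = true := by rw [aliveB_step a m k hi (Or.inl ha)]; exact halive
      rw [ih (by omega) _ halive']
      have hbrk : brkB a m hi k = true := by simp [brkB, halive, hm, ha]
      rw [PySem.Int.powMod_eq]
      show (res + PySem.Int.mod (2 ^ (k - onesLow a k)) pvMOD + SB a m hi k, _) = _
      rw [SB, hbrk, if_pos rfl]
      ring_nf
    · -- a1 m0 : dead, break
      rw [if_neg (by omega), if_pos ⟨hm, ha⟩]
      rw [SB_zero a m hi k (by omega) ha hm (k + 1) (le_refl _), add_zero]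
      rw [aliveB_dead a m k 0 hi (by omega) (by omega) ha hm]
    · -- a1 m1
      rw [if_neg (by omega), if_neg (by omega)]
      have halive' : aliveB a m k hi = true := by rw [aliveB_step a m k hi (Or.inr hm)]; exact halive
      rw [ih (by omega) res halive']
      rw [SB]
      have hbrk : brkB a m hi k = false := by simp [brkB, ha]
      rw [hbrk]; simp

lemma SB_TB (a m : Int) (hi : Nat) : ∀ k, k ≤ hi → SB a m hi k + TB a m hi k = TB a m hi 0 := by
  intro k
  induction k with
  | zero => intro _; rw [SB, zero_add]
  | succ k ih =>
    intro hk
    have hTB : TB a m hi k =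
        (if brkB a m hi k then PySem.Int.mod (2 ^ (k - onesLow a k)) pvMOD else 0) + TB a m hi (k + 1) := by
      rw [TB, if_pos (by omega)]
    rw [← ih (by omega), hTB, SB]
    ring

lemma TB_SA (a m : Int) (hi : Nat) : ∀ d k, k + d = hi →
    TB a m hi k % pvMOD = (SA a m hi k * 2 ^ (k - onesLow a k)) % pvMOD := by
  intro d
  induction d with
  | zero =>
    intro k hk
    rw [TB, if_neg (by omega), SA, if_neg (by omega)]
    simp
  | succ d ih =>
    intro k hk
    have hkhi : k < hi := by omega
    have IH := ih (k + 1) (by omega)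
    rw [TB, if_pos hkhi, SA, if_pos hkhi]
    have hterm : (if brkB a m hi k then PySem.Int.mod (2 ^ (k - onesLow a k)) pvMOD else 0) % pvMOD
        = ((if brkB a m hi k then (1:Int) else 0) * 2 ^ (k - onesLow a k)) % pvMOD := by
      cases h : brkB a m hi k
      · simp
      · simp only [pvMOD_eq]
        simp
    calc ((if brkB a m hi k then PySem.Int.mod (2 ^ (k - onesLow a k)) pvMOD else 0) + TB a m hi (k + 1)) % pvMOD
        = ((if brkB a m hi k then PySem.Int.mod (2 ^ (k - onesLow a k)) pvMOD else 0) % pvMOD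
            + TB a m hi (k + 1) % pvMOD) % pvMOD := by rw [Int.add_emod]
      _ = (((if brkB a m hi k then (1:Int) else 0) * 2 ^ (k - onesLow a k)) % pvMOD
            + (SA a m hi (k + 1) * 2 ^ (k + 1 - onesLow a (k + 1))) % pvMOD) % pvMOD := by
            rw [hterm, IH]
      _ = (((if brkB a m hi k then (1:Int) else 0) * 2 ^ (k - onesLow a k))
            + SA a m hi (k + 1) * 2 ^ (k + 1 - onesLow a (k + 1))) % pvMOD := by rw [← Int.add_emod]
      _ = (((if brkB a m hi k then (1:Int) else 0)
            + (if bitOf a k = 0 then 2 else 1) * SA a m hi (k + 1)) * 2 ^ (k - onesLow a k)) % pvMOD := by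
            rw [pow_zeros_succ]; ring_nf

lemma getD_mk2_true (x y : Int) : (PySem.Dict.mk [(true, x), (false, y)]).getD true 0 = x := by
  simp [PySem.Dict.getD, PySem.Dict.get?, List.find?]

lemma getD_mk2_false (x y : Int) : (PySem.Dict.mk [(true, x), (false, y)]).getD false 0 = y := by
  simp [PySem.Dict.getD, PySem.Dict.get?, List.find?]

-- ===== VERDICT (by name: the statement is the Claim_ definition above) =====
theorem count_supersets_spec : Claim_equal_count_supersets := by
  unfold Claim_equal_count_supersets Spec_count_supersets
  intro a m _
  set hi := PySem.Int.bitLength m with hhi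
  have hinit : (PySem.Dict.ofList [(true, (1:Int)), (false, 0)]) = PySem.Dict.mk [(true, 1), (false, 0)] := by
    decide
  obtain ⟨f', hfold, hf0, hf1, hfm⟩ := loopA a m hi hi (le_refl _) 1 0
    (by rw [aliveB_refl]; rfl) (le_refl _) (by norm_num [pvMOD_eq])
    (by rw [SA, if_neg (by omega)])
  have hA : count_supersets a m
      = PySem.Int.mod ((if aliveB a m 0 hi then (1:Int) else 0) + f') pvMOD := by
    simp only [count_supersets, ← hhi, hinit, hfold, getD_mk2_true, getD_mk2_false]
  have hB : count_supersets_alt a m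
      = PySem.Int.mod (SB a m hi hi + (if aliveB a m 0 hi then (1:Int) else 0)) pvMOD := by
    simp only [count_supersets_alt, ← hhi,
      loopB a m hi hi (le_refl _) 0 (aliveB_refl a m hi), zero_add]
  have hSB : SB a m hi hi = TB a m hi 0 := by
    have h := SB_TB a m hi hi (le_refl _)
    rw [TB, if_neg (by omega), add_zero] at h
    exact h
  have hTS : TB a m hi 0 % pvMOD = SA a m hi 0 % pvMOD := by
    have h := TB_SA a m hi hi 0 (by omega)
    simpa using h
  rw [hA, hB, modM, modM, hSB]
  have : f' % pvMOD = TB a m hi 0 % pvMOD := by rw [hfm, hTS]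
  simp only [pvMOD_eq] at this ⊢
  omega
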